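-- pv_equiv track=rewrite | github.com/janezd/predavanja | p1/domače naloge/2020/08 covid-19/resitev.py | korakov_do_vseh
-- ===== SOURCE A (Python) =====
-- from functools import reduce
-- from itertools import count
--
-- def okuzeni(skupine, nosilci):
--     return set.union(*(skupina for skupina in skupine if skupina & nosilci), set()) - nosilci
--
-- def korakov_do_vseh(skupine, prinasalec):
--     vsi = reduce(set.union, skupine)
--     doslej_okuzeni = {prinasalec}
--     for i in count():
--         if doslej_okuzeni == vsi:
--             return i
--         novookuzeni = okuzeni(skupine, doslej_okuzeni)
--         if not novookuzeni:
--             return None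
--         doslej_okuzeni |= novookuzeni
-- ===== SOURCE B (Python) =====
-- def korakov_do_vseh(skupine, prinasalec):
--     # Level-synchronous BFS: keep only not-yet-consumed groups, test them against the
--     # current frontier only, and drop each group permanently once it is touched.
--     vsi = set()
--     for s in skupine:
--         vsi |= s
--     visited = {prinasalec}
--     frontier = {prinasalec}
--     remaining = list(skupine)
--     rounds = 0
--     while True:
--         if visited == vsi:
--             return rounds
--         touched = []
--         still = []
--         for g in remaining:
--             if frontier.isdisjoint(g):
--                 still.append(g)
--             else:
--                 touched.append(g)
--         new = set()
--         for g in touched: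
--             new |= g
--         new -= visited
--         if not new:
--             return None
--         visited |= new
--         frontier = new
--         remaining = still
--         rounds += 1
-- ===== Notes on version B (the rewrite author's own statement) =====
-- stated objective: faster
-- what changed: A re-scans every group and re-unions all groups touching the whole infected set on every round; B runs a level-synchronous BFS that intersects only the not-yet-consumed groups with the current frontier and removes each group permanently once touched, so each group's members are unioned at most once.
import Mathlib
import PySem

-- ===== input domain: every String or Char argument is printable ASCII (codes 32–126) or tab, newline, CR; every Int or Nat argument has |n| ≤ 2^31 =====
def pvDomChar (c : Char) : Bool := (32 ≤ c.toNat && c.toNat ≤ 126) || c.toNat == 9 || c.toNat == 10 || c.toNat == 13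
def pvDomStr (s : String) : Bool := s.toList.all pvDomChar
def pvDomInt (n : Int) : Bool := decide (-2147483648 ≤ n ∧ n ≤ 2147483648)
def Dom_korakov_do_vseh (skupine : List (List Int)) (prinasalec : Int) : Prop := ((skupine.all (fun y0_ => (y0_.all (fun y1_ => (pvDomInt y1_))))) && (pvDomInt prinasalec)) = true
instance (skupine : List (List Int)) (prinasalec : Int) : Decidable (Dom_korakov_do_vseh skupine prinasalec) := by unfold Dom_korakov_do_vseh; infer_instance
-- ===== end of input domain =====

-- B replaces A's per-round rescan/re-union of ALL groups by a frontier BFS over the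
-- not-yet-consumed groups only (objective: faster; each touched group is dropped for good).

-- Fuel bound shared by both loop ports: each round that does not return strictly grows the
-- infected set, which lives inside (union of all groups) ∪ {prinasalec}, so at most
-- (total length of skupine) + 1 rounds are entered; the 0-fuel branch is never reached.
def pvFuel (skupine : List (List Int)) : Nat := (skupine.map List.length).sum + 2

-- ===== PORT A =====
def okuzeniA (skupine : List (PySem.Set Int)) (nosilci : PySem.Set Int) : PySem.Set Int :=
  PySem.Set.diff
    ((skupine.filter (fun g => !(PySem.Set.inter g nosilci).isEmpty)).foldl
      PySem.Set.union PySem.Set.empty)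
    nosilci

def loopA (skupine : List (PySem.Set Int)) (vsi : PySem.Set Int) :
    Nat → Int → PySem.Set Int → Option Int
  | 0, _, _ => none
  | fuel + 1, i, doslej =>
    if PySem.Set.equal doslej vsi then some i
    else
      let novookuzeni := okuzeniA skupine doslej
      if novookuzeni.isEmpty then none
      else loopA skupine vsi fuel (i + 1) (PySem.Set.union doslej novookuzeni)

def korakov_do_vseh (skupine : List (List Int)) (prinasalec : Int) : Option Int :=
  match skupine.map PySem.Set.ofList with
  | [] => none  -- Python: reduce(set.union, []) raises TypeError; excluded by Pre_
  | g :: t =>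
    let vsi := t.foldl PySem.Set.union g   -- vsi = reduce(set.union, skupine)
    loopA (g :: t) vsi (pvFuel skupine) 0 (PySem.Set.ofList [prinasalec])

-- ===== PORT B =====
def loopB (vsi : PySem.Set Int) :
    Nat → Int → PySem.Set Int → PySem.Set Int → List (PySem.Set Int) → Option Int
  | 0, _, _, _, _ => none
  | fuel + 1, rounds, visited, frontier, remaining =>
    if PySem.Set.equal visited vsi then some rounds
    else
      let ts := remaining.foldl
        (fun (acc : List (PySem.Set Int) × List (PySem.Set Int)) g =>
          if PySem.Set.isdisjoint frontier g then (acc.1, acc.2 ++ [g])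
          else (acc.1 ++ [g], acc.2)) ([], [])
      let nw := PySem.Set.diff (ts.1.foldl PySem.Set.union PySem.Set.empty) visited
      if nw.isEmpty then none
      else loopB vsi fuel (rounds + 1) (PySem.Set.union visited nw) nw ts.2

def korakov_do_vseh_alt (skupine : List (List Int)) (prinasalec : Int) : Option Int :=
  let sk := skupine.map PySem.Set.ofList
  let vsi := sk.foldl PySem.Set.union PySem.Set.empty
  loopB vsi (pvFuel skupine) 0 (PySem.Set.ofList [prinasalec]) (PySem.Set.ofList [prinasalec]) sk

-- ===== PRECONDITION & SPEC =====
-- Pre_ excludes only skupine = [], on which A raises TypeError (reduce of an empty sequence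
-- with no initializer); B returns None there.
def Pre_korakov_do_vseh (skupine : List (List Int)) (prinasalec : Int) : Prop := skupine ≠ []
instance (skupine : List (List Int)) (prinasalec : Int) : Decidable (Pre_korakov_do_vseh skupine prinasalec) := by unfold Pre_korakov_do_vseh; infer_instance
def pvWitness_korakov_do_vseh : List (List Int) × Int := ([[1, 2], [2, 3]], 1)

def Spec_korakov_do_vseh (skupine : List (List Int)) (prinasalec : Int) (out : Option Int) : Prop := out = korakov_do_vseh_alt skupine prinasalec
instance (skupine : List (List Int)) (prinasalec : Int) (out : Option Int) : Decidable (Spec_korakov_do_vseh skupine prinasalec out) := by unfold Spec_korakov_do_vseh; infer_instance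

-- ===== CLAIM (what is proved, stated in full; the proofs are below) =====
def Claim_equal_korakov_do_vseh : Prop := ∀ (skupine : List (List Int)) (prinasalec : Int), Dom_korakov_do_vseh skupine prinasalec → Pre_korakov_do_vseh skupine prinasalec → Spec_korakov_do_vseh skupine prinasalec (korakov_do_vseh skupine prinasalec)

-- ===== LEMMAS AND PROOFS =====

lemma foldl_union_eq_update (L : List (List Int)) (s : PySem.Set Int) :
    L.foldl PySem.Set.union s = PySem.Set.update s L.flatten := by
  induction L generalizing s with
  | nil => simp [PySem.Set.update_nil]
  | cons g t ih => simp [List.foldl_cons, ih, PySem.Set.update_append]; rfl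

lemma foldl_union_eq_ofList (L : List (List Int)) :
    L.foldl PySem.Set.union PySem.Set.empty = PySem.Set.ofList L.flatten := by
  rw [foldl_union_eq_update]; exact PySem.Set.update_nil_left _

lemma filter_ofList (p : Int → Bool) (xs : List Int) :
    (PySem.Set.ofList xs).filter p = PySem.Set.ofList (xs.filter p) := by
  have hd : ∀ (s : List Int) (x : Int), PySem.Set.discard s x = s.filter (fun y => !(y == x)) :=
    fun _ _ => rfl
  induction xs with
  | nil => rfl
  | cons x xs ih =>
    rw [PySem.Set.ofList_cons, hd]
    by_cases hp : p x = true
    · rw [List.filter_cons_of_pos hp, List.filter_cons_of_pos hp, PySem.Set.ofList_cons, hd,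
        ← ih, List.filter_filter, List.filter_filter]
      exact congrArg (x :: ·) (List.filter_congr (fun y _ => Bool.and_comm _ _))
    · simp only [Bool.not_eq_true] at hp
      rw [List.filter_cons_of_neg (by simp [hp]), List.filter_cons_of_neg (by simp [hp]),
        ← ih, List.filter_filter]
      exact List.filter_congr (fun y _ => by by_cases hy : y = x <;> simp [hy, hp])

lemma inter_isEmpty_iff (g s : List Int) :
    ((PySem.Set.inter g s).isEmpty = true) ↔ ∀ x ∈ g, x ∉ s := by
  simp [PySem.Set.inter, List.isEmpty_iff, List.filter_eq_nil_iff]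

lemma core_round (V F : List Int) (sk : List (List Int))
    (hVF : ∀ x ∈ F, x ∈ V)
    (hcons : ∀ g ∈ sk, (∃ x ∈ g, x ∈ V ∧ x ∉ F) → ∀ x ∈ g, x ∈ V) :
    (sk.filter (fun g => !(PySem.Set.inter g V).isEmpty)).flatten.filter
        (fun x => !(PySem.Set.contains V x))
    = ((sk.filter (fun g => (PySem.Set.inter g (PySem.Set.diff V F)).isEmpty)).filter
        (fun g => !(PySem.Set.inter g F).isEmpty)).flatten.filter
        (fun x => !(PySem.Set.contains V x)) := by
  rw [List.filter_filter]
  induction sk with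
  | nil => rfl
  | cons g t ih =>
    have ht := ih (fun g' hg' => hcons g' (List.mem_cons_of_mem _ hg'))
    have hg := hcons g List.mem_cons_self
    have hsub : ∀ x ∈ g, x ∈ V → (∃ y ∈ g, y ∈ V ∧ y ∉ F) ∨ x ∈ F := by
      intro x hx hxV
      by_cases hxF : x ∈ F
      · exact Or.inr hxF
      · exact Or.inl ⟨x, hx, hxV, hxF⟩
    simp only [List.filter_cons]
    by_cases hAV : ∃ x ∈ g, x ∈ V
    · have hA : (!(PySem.Set.inter g V).isEmpty) = true := by
        simp only [Bool.not_eq_true', Bool.eq_false_iff]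
        intro h; obtain ⟨x, hx, hxV⟩ := hAV; exact (inter_isEmpty_iff g V).mp h x hx hxV
      rw [if_pos hA, List.flatten_cons, List.filter_append]
      by_cases hF : ∃ x ∈ g, x ∈ F
      · have hpF : (!(PySem.Set.inter g F).isEmpty) = true := by
          simp only [Bool.not_eq_true', Bool.eq_false_iff]
          intro h; obtain ⟨x, hx, hxF⟩ := hF; exact (inter_isEmpty_iff g F).mp h x hx hxF
        by_cases hW : ∃ x ∈ g, x ∈ V ∧ x ∉ F
        · have hqW : ((PySem.Set.inter g (PySem.Set.diff V F)).isEmpty) = false := by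
            rw [Bool.eq_false_iff]
            intro h
            obtain ⟨x, hx, hxV, hxF⟩ := hW
            exact (inter_isEmpty_iff _ _).mp h x hx (by simp [PySem.Set.mem_diff]; exact ⟨hxV, hxF⟩)
          rw [if_neg (by simp [hqW])]
          have hnil : g.filter (fun x => !(PySem.Set.contains V x)) = [] :=
            List.filter_eq_nil_iff.mpr (fun x hx => by simp; exact hg hW x hx)
          rw [hnil, List.nil_append]
          exact ht
        · have hqW : ((PySem.Set.inter g (PySem.Set.diff V F)).isEmpty) = true := by
            rw [inter_isEmpty_iff]
            intro x hx hxd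
            rw [PySem.Set.mem_diff] at hxd
            exact hW ⟨x, hx, hxd.1, hxd.2⟩
          rw [if_pos (by simp [hpF, hqW]), List.flatten_cons, List.filter_append, ht]
      · have hpF : (PySem.Set.inter g F).isEmpty = true := by
          rw [inter_isEmpty_iff]
          exact fun x hx hxF => hF ⟨x, hx, hxF⟩
        rw [if_neg (by simp [hpF])]
        have hW : ∃ x ∈ g, x ∈ V ∧ x ∉ F := by
          obtain ⟨x, hx, hxV⟩ := hAV
          rcases hsub x hx hxV with h | hxF
          · exact h
          · exact absurd ⟨x, hx, hxF⟩ hF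
        have hnil : g.filter (fun x => !(PySem.Set.contains V x)) = [] :=
          List.filter_eq_nil_iff.mpr (fun x hx => by simp; exact hg hW x hx)
        rw [hnil, List.nil_append]
        exact ht
    · have hA : (PySem.Set.inter g V).isEmpty = true := by
        rw [inter_isEmpty_iff]
        exact fun x hx hxV => hAV ⟨x, hx, hxV⟩
      have hpF : (PySem.Set.inter g F).isEmpty = true := by
        rw [inter_isEmpty_iff]
        exact fun x hx hxF => hAV ⟨x, hx, hVF x hxF⟩
      rw [if_neg (by simp [hA]), if_neg (by simp [hpF])]
      exact ht


-- one-pass isdisjoint partition = the two intersection filters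
lemma partition_eq (F : List Int) (rem : List (List Int)) :
    rem.foldl (fun (acc : List (List Int) × List (List Int)) g =>
        if PySem.Set.isdisjoint F g then (acc.1, acc.2 ++ [g]) else (acc.1 ++ [g], acc.2))
      ([], [])
    = (rem.filter (fun g => !(PySem.Set.inter g F).isEmpty),
       rem.filter (fun g => (PySem.Set.inter g F).isEmpty)) := by
  have heq : ∀ g, PySem.Set.isdisjoint F g = (PySem.Set.inter g F).isEmpty := by
    intro g
    rw [Bool.eq_iff_iff, PySem.Set.isdisjoint_iff, inter_isEmpty_iff]
    exact ⟨fun h x hxg hxF => h x hxF hxg, fun h x hxF hxg => h x hxg hxF⟩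
  have h1 : rem.foldl (fun (acc : List (List Int) × List (List Int)) g =>
        if PySem.Set.isdisjoint F g then (acc.1, acc.2 ++ [g]) else (acc.1 ++ [g], acc.2))
      ([], [])
      = rem.foldl (fun (acc : List (List Int) × List (List Int)) g =>
        ((if !(PySem.Set.inter g F).isEmpty then acc.1 ++ [g] else acc.1),
         (if (PySem.Set.inter g F).isEmpty then acc.2 ++ [g] else acc.2))) ([], []) :=
    PySem.List.foldl_congr_mem _ _ _ _ (fun acc g _ => by
      rw [heq g]
      by_cases h : (PySem.Set.inter g F).isEmpty = true <;> simp [h])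
  rw [h1, PySem.List.foldl_prod_mk
        (f := fun acc g => if !(PySem.Set.inter g F).isEmpty then acc ++ [g] else acc)
        (g := fun acc g => if (PySem.Set.inter g F).isEmpty then acc ++ [g] else acc),
      PySem.List.foldl_append_if_eq_filter, PySem.List.foldl_append_if_eq_filter,
      List.nil_append, List.nil_append]

lemma loop_eq (sk : List (PySem.Set Int)) (vsi : PySem.Set Int) :
    ∀ (fuel : Nat) (i : Int) (V F : PySem.Set Int) (rem : List (PySem.Set Int)),
    V.Nodup →
    (∀ x ∈ F, x ∈ V) →
    rem = sk.filter (fun g => (PySem.Set.inter g (PySem.Set.diff V F)).isEmpty) →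
    (∀ g ∈ sk, (∃ x ∈ g, x ∈ V ∧ x ∉ F) → ∀ x ∈ g, x ∈ V) →
    loopA sk vsi fuel i V = loopB vsi fuel i V F rem := by
  intro fuel
  induction fuel with
  | zero => intro _ _ _ _ _ _ _ _; rfl
  | succ fuel ih =>
    intro i V F rem hVnd hVF hrem hcons
    have hkey : okuzeniA sk V
        = PySem.Set.diff ((rem.filter (fun g => !(PySem.Set.inter g F).isEmpty)).foldl
            PySem.Set.union PySem.Set.empty) V := by
      subst hrem
      show ((sk.filter _).foldl PySem.Set.union PySem.Set.empty).filter _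
        = (((sk.filter _).filter _).foldl PySem.Set.union PySem.Set.empty).filter _
      rw [foldl_union_eq_ofList, foldl_union_eq_ofList, filter_ofList, filter_ofList,
        core_round V F sk hVF hcons]
    -- abbreviations for the new round
    set nov := okuzeniA sk V with hnovdef
    have hnovmem : ∀ y, y ∈ nov ↔
        (y ∈ (rem.filter (fun g => !(PySem.Set.inter g F).isEmpty)).flatten ∧ y ∉ V) := by
      intro y
      rw [hkey, foldl_union_eq_ofList]
      rw [PySem.Set.mem_diff, PySem.Set.mem_ofList]
    have hnovV : ∀ x ∈ okuzeniA sk V, x ∉ V := fun x hx => ((hnovmem x).mp hx).2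
    simp only [loopA, loopB, partition_eq]
    rw [← hkey]
    by_cases heq : PySem.Set.equal V vsi = true
    · rw [if_pos heq, if_pos heq]
    · rw [if_neg heq, if_neg heq]
      by_cases hne : (okuzeniA sk V).isEmpty = true
      · rw [if_pos hne, if_pos hne]
      · rw [if_neg hne, if_neg hne]
        apply ih
        · exact PySem.Set.nodup_union V _ hVnd
        · intro x hx
          rw [PySem.Set.mem_union]
          exact Or.inr hx
        · -- remaining' invariant
          rw [hrem, List.filter_filter]
          apply List.filter_congr
          intro g hg
          rw [Bool.eq_iff_iff]
          constructor
          · intro h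
            rw [Bool.and_eq_true, inter_isEmpty_iff, inter_isEmpty_iff] at h
            rw [inter_isEmpty_iff]
            intro x hx hxd
            rw [PySem.Set.mem_diff, PySem.Set.mem_union] at hxd
            obtain ⟨hxVn, hxnov⟩ := hxd
            have hxV : x ∈ V := by
              rcases hxVn with h' | h'
              · exact h'
              · exact absurd h' hxnov
            by_cases hxF : x ∈ F
            · exact h.1 x hx hxF
            · exact h.2 x hx (by rw [PySem.Set.mem_diff]; exact ⟨hxV, hxF⟩)
          · intro h
            rw [inter_isEmpty_iff] at h
            rw [Bool.and_eq_true, inter_isEmpty_iff, inter_isEmpty_iff]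
            have hd : ∀ x ∈ g, x ∉ V := by
              intro x hx hxV
              exact h x hx (by
                rw [PySem.Set.mem_diff, PySem.Set.mem_union]
                exact ⟨Or.inl hxV, fun hxn => hnovV x hxn hxV⟩)
            exact ⟨fun x hx hxF => hd x hx (hVF x hxF),
                   fun x hx hxd => hd x hx ((PySem.Set.mem_diff V F x).mp hxd).1⟩
        · -- consumed invariant
          intro g hgsk hwit y hy
          obtain ⟨x, hx, hxVn, hxnov⟩ := hwit
          rw [PySem.Set.mem_union] at hxVn
          have hxV : x ∈ V := by
            rcases hxVn with h' | h'
            · exact h'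
            · exact absurd h' hxnov
          rw [PySem.Set.mem_union]
          by_cases hxF : x ∈ F
          · by_cases hgrem : (PySem.Set.inter g (PySem.Set.diff V F)).isEmpty = true
            · -- g is in remaining and touched: every member lands in V ∪ nov
              have hgrem' : g ∈ rem := by
                rw [hrem, List.mem_filter]
                exact ⟨hgsk, hgrem⟩
              have hgt : g ∈ rem.filter (fun g => !(PySem.Set.inter g F).isEmpty) := by
                rw [List.mem_filter]
                refine ⟨hgrem', ?_⟩
                simp only [Bool.not_eq_true', Bool.eq_false_iff]
                intro h'
                exact (inter_isEmpty_iff g F).mp h' x hx hxF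
              by_cases hyV : y ∈ V
              · exact Or.inl hyV
              · refine Or.inr ((hnovmem y).mpr ⟨?_, hyV⟩)
                rw [List.mem_flatten]
                exact ⟨g, hgt, hy⟩
            · -- g already touched the old visited set: g ⊆ V
              have : ∃ z ∈ g, z ∈ V ∧ z ∉ F := by
                rcases List.isEmpty_eq_false_iff_exists_mem.mp (Bool.eq_false_iff.mpr hgrem) with ⟨z, hz⟩
                rw [PySem.Set.mem_inter] at hz
                rcases hz with ⟨hzg, hzd⟩
                rw [PySem.Set.mem_diff] at hzd
                exact ⟨z, hzg, hzd.1, hzd.2⟩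
              exact Or.inl (hcons g hgsk this y hy)
          · exact Or.inl (hcons g hgsk ⟨x, hx, hxV, hxF⟩ y hy)

-- ===== VERDICT (by name: the statement is the Claim_ definition above) =====
theorem korakov_do_vseh_spec : Claim_equal_korakov_do_vseh := by
  intro skupine prinasalec _hdom hpre
  unfold Spec_korakov_do_vseh
  cases skupine with
  | nil => exact absurd rfl hpre
  | cons a rest =>
    simp only [korakov_do_vseh, korakov_do_vseh_alt, List.map_cons]
    have hvsi : (PySem.Set.ofList a :: rest.map PySem.Set.ofList).foldl
        PySem.Set.union PySem.Set.empty
        = (rest.map PySem.Set.ofList).foldl PySem.Set.union (PySem.Set.ofList a) := by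
      rw [List.foldl_cons]
      have : PySem.Set.union PySem.Set.empty (PySem.Set.ofList a) = PySem.Set.ofList a :=
        (PySem.Set.update_nil_left (PySem.Set.ofList a)).trans (PySem.Set.ofList_ofList a)
      rw [this]
    rw [hvsi]
    apply loop_eq
    · exact PySem.Set.nodup_ofList _
    · exact fun x hx => hx
    · symm
      apply List.filter_eq_self.mpr
      intro g _
      rw [inter_isEmpty_iff]
      intro x _ hxd
      rw [PySem.Set.mem_diff] at hxd
      exact hxd.2 hxd.1
    · rintro g _ ⟨x, _, hxV, hxF⟩
      exact absurd hxV hxF
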